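-- pv_equiv track=rewrite | github.com/anoxis/CLI2API | cli2api/api/v1/chat.py | split_content_chunks
-- ===== SOURCE A (Python) =====
-- def split_content_chunks(content: str, max_size: int = 150) -> list[str]:
--     """Split large content into smaller chunks.
--
--     Tries to split on word boundaries for cleaner output.
--
--     Args:
--         content: Content to split.
--         max_size: Maximum chunk size in characters.
--
--     Returns:
--         List of content chunks.
--     """
--     if len(content) <= max_size:
--         return [content]
--
--     chunks = []
--     remaining = content
--
--     while remaining:
--         if len(remaining) <= max_size:
--             chunks.append(remaining)
--             break
--
--         # Try to find a good split point (space, newline)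
--         split_at = max_size
--         for sep in [" ", "\n", ".", ",", ";"]:
--             pos = remaining.rfind(sep, 0, max_size)
--             if pos > max_size // 2:  # Don't split too early
--                 split_at = pos + 1
--                 break
--
--         chunks.append(remaining[:split_at])
--         remaining = remaining[split_at:]
--
--     return chunks
-- ===== SOURCE B (Python) =====
-- def split_content_chunks(content: str, max_size: int = 150) -> list[str]:
--     """Split large content into chunks on word boundaries.
--
--     Staged algorithm: stage 1 computes the list of cut indices, scanning each
--     window once FORWARD and recording the last position of every character in
--     a dict (no per-separator rfind); stage 2 slices the content pairwise
--     between consecutive cuts.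
--     """
--     n = len(content)
--     if n <= max_size:
--         return [content]
--
--     cuts = [0]
--     i = 0
--     while n - i > max_size:
--         last = {}
--         for idx, ch in enumerate(content[i:i + max_size]):
--             last[ch] = idx
--         split_at = max_size
--         for sep in " \n.,;":
--             pos = last.get(sep, -1)
--             if pos > max_size // 2:
--                 split_at = pos + 1
--                 break
--         i += split_at
--         cuts.append(i)
--     cuts.append(n)
--     return [content[a:b] for a, b in zip(cuts, cuts[1:])]
-- ===== Notes on version B (the rewrite author's own statement) =====
-- stated objective: alternative
-- what changed: Replaces A's tail-re-slicing while loop with per-separator rfind by a staged algorithm: stage 1 scans each window once forward building a dict of last-seen positions per character and collects the cut indices; stage 2 slices the content pairwise between consecutive cuts.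
-- outside the precondition, e.g. on split_content_chunks('', -1): A returns [], B does not finish within the time limit
import Mathlib
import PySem

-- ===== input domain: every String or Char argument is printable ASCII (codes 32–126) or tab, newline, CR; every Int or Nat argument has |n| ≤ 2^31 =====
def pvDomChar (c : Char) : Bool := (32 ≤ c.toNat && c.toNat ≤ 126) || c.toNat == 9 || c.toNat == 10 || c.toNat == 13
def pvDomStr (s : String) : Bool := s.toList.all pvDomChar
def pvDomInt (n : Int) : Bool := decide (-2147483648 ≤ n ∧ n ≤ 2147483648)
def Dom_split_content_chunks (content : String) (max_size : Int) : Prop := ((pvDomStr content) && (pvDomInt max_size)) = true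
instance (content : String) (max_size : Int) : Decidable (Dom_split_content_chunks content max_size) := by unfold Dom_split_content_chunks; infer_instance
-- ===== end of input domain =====

-- B is a staged algorithm: cut indices first (one forward scan per window with a
-- last-seen dict instead of per-separator rfind), then pairwise slicing (objective: alternative).

-- ===== PORT A =====
def pvSeps : List Char := [' ', '\n', '.', ',', ';']

-- the 'for sep in [...]' loop with break: first separator whose rfind position beats max_size//2
def pvPickA (seps : List Char) (remaining : List Char) (ms : Int) : Int :=
  match seps with
  | [] => ms
  | c :: rest =>
    let pos := PySem.Chars.rfindFrom remaining [c] 0 (some ms)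
    if PySem.Int.floordiv ms 2 < pos then pos + 1 else pvPickA rest remaining ms

-- the 'while remaining' loop; fuel makes it total (Python diverges for max_size ≤ 0)
def pvLoopA (fuel : Nat) (remaining : List Char) (ms : Int) (chunks : List (List Char)) : List (List Char) :=
  match fuel with
  | 0 => chunks
  | fuel' + 1 =>
    if remaining = [] then chunks
    else if (remaining.length : Int) ≤ ms then chunks ++ [remaining]
    else
      let sa := pvPickA pvSeps remaining ms
      pvLoopA fuel' (PySem.Chars.slice remaining (some sa) none) ms
        (chunks ++ [PySem.Chars.slice remaining none (some sa)])

def split_content_chunks (content : String) (max_size : Int) : List String :=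
  let cs := content.toList
  if (cs.length : Int) ≤ max_size then [content]
  else (pvLoopA (cs.length + 1) cs max_size []).map String.ofList

-- ===== PORT B =====
def pvSepsB : List Char := " \n.,;".toList

-- the 'for idx, ch in enumerate(window)' loop: dict of last-seen position of every character
def pvLastMap (w : List Char) : PySem.Dict Char Int :=
  (PySem.List.enumerate w).foldl (fun d p => d.insert p.2 p.1) PySem.Dict.empty

-- the 'for sep in " \n.,;"' loop with break, reading the last-seen dict
def pvPickB (seps : List Char) (last : PySem.Dict Char Int) (ms : Int) : Int :=
  match seps with
  | [] => ms
  | c :: rest =>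
    let pos := last.getD c (-1)
    if PySem.Int.floordiv ms 2 < pos then pos + 1 else pvPickB rest last ms

-- stage 1: the 'while n - i > max_size' loop collecting cut indices; fuel makes it total
def pvCuts (fuel : Nat) (cs : List Char) (ms i : Int) (cuts : List Int) : List Int :=
  match fuel with
  | 0 => cuts
  | fuel' + 1 =>
    if (cs.length : Int) - i ≤ ms then cuts
    else
      let w := PySem.Chars.slice cs (some i) (some (i + ms))
      let sa := pvPickB pvSepsB (pvLastMap w) ms
      pvCuts fuel' cs ms (i + sa) (cuts ++ [i + sa])

-- stage 2: the '[content[a:b] for a, b in zip(cuts, cuts[1:])]' comprehension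
def pvRender (cs : List Char) (cuts : List Int) : List (List Char) :=
  (cuts.zip cuts.tail).map (fun p => PySem.Chars.slice cs (some p.1) (some p.2))

def split_content_chunks_alt (content : String) (max_size : Int) : List String :=
  let cs := content.toList
  if (cs.length : Int) ≤ max_size then [content]
  else
    (pvRender cs (((0 : Int) :: pvCuts (cs.length + 1) cs max_size 0 []) ++ [(cs.length : Int)])).map
      String.ofList

-- ===== PRECONDITION & SPEC =====
-- Pre_ excludes max_size ≤ 0 with content that does not already fit: there A's while
-- loop makes no progress and diverges on every nonempty content, and on empty content
-- with negative max_size A happens to return [] while B's index loop diverges.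
def Pre_split_content_chunks (content : String) (max_size : Int) : Prop :=
  1 ≤ max_size ∨ (content.toList.length : Int) ≤ max_size
instance (content : String) (max_size : Int) : Decidable (Pre_split_content_chunks content max_size) := by
  unfold Pre_split_content_chunks; infer_instance

def pvWitness_split_content_chunks : String × Int := ("ab c.def", 4)

def Spec_split_content_chunks (content : String) (max_size : Int) (out : List String) : Prop := out = split_content_chunks_alt content max_size
instance (content : String) (max_size : Int) (out : List String) : Decidable (Spec_split_content_chunks content max_size out) := by unfold Spec_split_content_chunks; infer_instance

-- ===== CLAIM (what is proved, stated in full; the proofs are below) =====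
def Claim_equal_split_content_chunks : Prop := ∀ (content : String) (max_size : Int), Dom_split_content_chunks content max_size → Pre_split_content_chunks content max_size → Spec_split_content_chunks content max_size (split_content_chunks content max_size)

-- ===== LEMMAS AND PROOFS =====

theorem pvGo_le (s sub : List Char) (j : Nat) : PySem.Chars.rfind.go s sub j ≤ (j : Int) := by
  induction j with
  | zero => simp only [PySem.Chars.rfind.go]; split <;> omega
  | succ j ih => simp only [PySem.Chars.rfind.go] at ih ⊢; split <;> omega

theorem pvGo_prefix (s sub : List Char) (j : Nat)
    (h : 0 ≤ PySem.Chars.rfind.go s sub j) :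
    sub <+: s.drop (PySem.Chars.rfind.go s sub j).toNat := by
  induction j with
  | zero =>
    simp only [PySem.Chars.rfind.go] at h ⊢
    split at h
    · rename_i hp
      simp only [hp, if_pos]
      simpa using (List.isPrefixOf_iff_prefix.mp hp)
    · omega
  | succ j ih =>
    simp only [PySem.Chars.rfind.go] at h ⊢
    split at h
    · rename_i hp
      simp only [hp, if_pos]
      simpa using (List.isPrefixOf_iff_prefix.mp hp)
    · rename_i hp
      simp only [hp, if_false, Bool.false_eq_true]
      exact ih h

theorem pvRfind_lt_length (s sub : List Char) (hsub : sub ≠ [])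
    (h : 0 ≤ PySem.Chars.rfind s sub) : PySem.Chars.rfind s sub < (s.length : Int) := by
  have hp := pvGo_prefix s sub s.length (by simpa [PySem.Chars.rfind] using h)
  have hle := pvGo_le s sub s.length
  simp only [PySem.Chars.rfind] at *
  by_contra hlt
  have : s.drop (PySem.Chars.rfind.go s sub s.length).toNat = [] := by
    apply List.drop_eq_nil_of_le; omega
  rw [this] at hp
  exact hsub (List.prefix_nil.mp hp)

-- A's rfind(sep, 0, max_size) on the remaining tail, as plain rfind on the window
theorem pvRfindFrom_zero (rem sub : List Char) (ms : Int) (hms : 1 ≤ ms)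
    (hlt : ms < (rem.length : Int)) :
    PySem.Chars.rfindFrom rem sub 0 (some ms) = PySem.Chars.rfind (rem.take ms.toNat) sub := by
  simp only [PySem.Chars.rfindFrom]
  rw [if_neg (show ¬ ((rem.length : Int) < ms) by omega),
      if_neg (show ¬ (ms < 0) by omega),
      if_neg (show ¬ ((0:Int) < 0) by omega),
      if_neg (show ¬ (ms < 0) by omega)]
  simp only [Int.toNat_zero, List.drop_zero]
  split
  · rename_i h; omega
  · simp

-- [c] is a prefix of xs ++ ys iff of xs, for nonempty xs
theorem pvPrefC (c : Char) (xs ys : List Char) (h : xs ≠ []) :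
    List.isPrefixOf [c] (xs ++ ys) = List.isPrefixOf [c] xs := by
  cases xs with
  | nil => exact absurd rfl h
  | cons x t => simp [List.isPrefixOf]

theorem pvGo_append_singleton (w : List Char) (c d : Char) (hne : d ≠ c) :
    ∀ j : Nat, j ≤ w.length →
      PySem.Chars.rfind.go (w ++ [d]) [c] j = PySem.Chars.rfind.go w [c] j := by
  intro j
  induction j with
  | zero =>
    intro _
    simp only [PySem.Chars.rfind.go]
    cases w with
    | nil =>
      have h1 : List.isPrefixOf [c] ([] ++ [d]) = false := by
        simp [List.isPrefixOf]; exact fun h => hne h.symm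
      have h2 : List.isPrefixOf [c] ([] : List Char) = false := by simp [List.isPrefixOf]
      rw [h1, h2]
    | cons x t => rw [pvPrefC c (x :: t) [d] (by simp)]
  | succ j ih =>
    intro hj
    simp only [PySem.Chars.rfind.go]
    rw [List.drop_append_of_le_length (by omega)]
    by_cases hlen : j + 1 = w.length
    · have hd0 : w.drop (j+1) = [] := List.drop_eq_nil_of_le (by omega)
      rw [hd0]
      have h1 : List.isPrefixOf [c] ([] ++ [d]) = false := by
        simp [List.isPrefixOf]; exact fun h => hne h.symm
      have h2 : List.isPrefixOf [c] ([] : List Char) = false := by simp [List.isPrefixOf]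
      rw [h1, h2]
      simp only [Bool.false_eq_true, if_false]
      exact ih (by omega)
    · rw [pvPrefC c (w.drop (j+1)) [d] (by simp [List.drop_eq_nil_iff]; omega)]
      by_cases hp : List.isPrefixOf [c] (w.drop (j+1)) = true
      · rw [hp]; simp
      · simp only [Bool.not_eq_true] at hp
        rw [hp]
        simp only [Bool.false_eq_true, if_false]
        exact ih (by omega)

theorem pvRfind_append_singleton (w : List Char) (c d : Char) :
    PySem.Chars.rfind (w ++ [d]) [c]
      = if d = c then (w.length : Int) else PySem.Chars.rfind w [c] := by
  have hnil : List.isPrefixOf [c] ([] : List Char) = false := by simp [List.isPrefixOf]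
  have hstep : PySem.Chars.rfind (w ++ [d]) [c] = PySem.Chars.rfind.go (w ++ [d]) [c] w.length := by
    have hlen : (w ++ [d]).length = w.length + 1 := by simp
    rw [PySem.Chars.rfind, hlen]
    simp only [PySem.Chars.rfind.go]
    rw [show List.drop (w.length + 1) (w ++ [d]) = [] from
          List.drop_eq_nil_of_le (by simp), hnil]
    simp
  rw [hstep]
  by_cases hdc : d = c
  · subst hdc
    rw [if_pos rfl]
    cases w with
    | nil => simp [PySem.Chars.rfind.go, List.isPrefixOf]
    | cons x t =>
      have hl : (x :: t).length = t.length + 1 := rfl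
      rw [hl]
      simp only [PySem.Chars.rfind.go]
      rw [show List.drop (t.length + 1) ((x :: t) ++ [d]) = [d] by
            rw [show t.length + 1 = (x :: t).length from rfl, List.drop_left]]
      simp [List.isPrefixOf]
  · rw [if_neg hdc]
    rw [pvGo_append_singleton w c d hdc w.length le_rfl]
    rfl

-- B's forward last-seen dict agrees with rfind on the window
theorem pvLastMap_getD (w : List Char) (c : Char) :
    (pvLastMap w).getD c (-1) = PySem.Chars.rfind w [c] := by
  induction w using List.reverseRecOn with
  | nil =>
    simp [pvLastMap, PySem.List.enumerate, PySem.Dict.getD, PySem.Dict.get?,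
      PySem.Dict.empty, PySem.Chars.rfind, PySem.Chars.rfind.go, List.isPrefixOf]
  | append_singleton w d ih =>
    have henum : PySem.List.enumerate (w ++ [d]) 0
        = PySem.List.enumerate w 0 ++ [((w.length : Int), d)] := by
      rw [PySem.List.enumerate_append]
      simp [PySem.List.enumerate]
    unfold pvLastMap
    rw [henum, List.foldl_append]
    simp only [List.foldl_cons, List.foldl_nil]
    rw [PySem.Dict.getD_insert]
    rw [pvRfind_append_singleton w c d]
    by_cases hcd : c = d
    · rw [if_pos hcd, if_pos hcd.symm]
    · rw [if_neg hcd, if_neg (fun h => hcd h.symm)]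
      exact ih

theorem pvFloordiv_two_nonneg (ms : Int) (hms : 1 ≤ ms) : 0 ≤ PySem.Int.floordiv ms 2 := by
  rw [PySem.Int.floordiv_eq_ediv_of_pos (by omega)]
  exact Int.ediv_nonneg (by omega) (by omega)

-- A's pick (rfind per separator on the tail) = B's pick (last-seen dict of the window)
theorem pvPick_eq (seps : List Char) (rem : List Char) (ms : Int)
    (hms : 1 ≤ ms) (hlt : ms < (rem.length : Int)) :
    pvPickA seps rem ms = pvPickB seps (pvLastMap (rem.take ms.toNat)) ms := by
  induction seps with
  | nil => rfl
  | cons c rest ih =>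
    simp only [pvPickA, pvPickB]
    rw [pvRfindFrom_zero rem [c] ms hms hlt, ← pvLastMap_getD]
    split
    · rfl
    · exact ih

theorem pvPickA_bounds (seps : List Char) (rem : List Char) (ms : Int)
    (hms : 1 ≤ ms) (hlt : ms < (rem.length : Int)) :
    1 ≤ pvPickA seps rem ms ∧ pvPickA seps rem ms ≤ ms := by
  induction seps with
  | nil => simp only [pvPickA]; omega
  | cons c rest ih =>
    simp only [pvPickA]
    rw [pvRfindFrom_zero rem [c] ms hms hlt]
    have hd := pvFloordiv_two_nonneg ms hms
    by_cases hc : PySem.Int.floordiv ms 2 < PySem.Chars.rfind (rem.take ms.toNat) [c]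
    · rw [if_pos hc]
      have hge : 0 ≤ PySem.Chars.rfind (rem.take ms.toNat) [c] := by omega
      have hub := pvRfind_lt_length (rem.take ms.toNat) [c] (by simp) hge
      have hlen : ((rem.take ms.toNat).length : Int) ≤ ms := by
        simp [List.length_take]; omega
      omega
    · rw [if_neg hc]; exact ih

theorem pvRender_cons (cs : List Char) (a b : Int) (rest : List Int) :
    pvRender cs (a :: b :: rest)
      = PySem.Chars.slice cs (some a) (some b) :: pvRender cs (b :: rest) := rfl

-- pvCuts over a seeded accumulator
theorem pvCuts_acc (fuel : Nat) (cs : List Char) (ms : Int) :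
    ∀ (i : Int) (acc : List Int), pvCuts fuel cs ms i acc = acc ++ pvCuts fuel cs ms i [] := by
  induction fuel with
  | zero => intro i acc; simp [pvCuts]
  | succ fuel ih =>
    intro i acc
    simp only [pvCuts]
    split
    · simp
    · set sa := pvPickB pvSepsB (pvLastMap (PySem.Chars.slice cs (some i) (some (i + ms)))) ms with hsa
      rw [ih (i + sa) (acc ++ [i + sa]), ih (i + sa) ([] ++ [i + sa])]
      simp

-- the loop of A produces exactly the pairwise slices between B's cut indices
theorem pvLoop_render (cs : List Char) (ms : Int) (hms : 1 ≤ ms) :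
    ∀ (fuel : Nat) (k : Nat) (chunks : List (List Char)),
      k < cs.length → cs.length - k < fuel →
      pvLoopA fuel (cs.drop k) ms chunks
        = chunks ++ pvRender cs (((k : Int) :: pvCuts fuel cs ms (k : Int) []) ++ [(cs.length : Int)]) := by
  intro fuel
  induction fuel with
  | zero => intro k chunks hk hf; omega
  | succ fuel ih =>
    intro k chunks hk hf
    simp only [pvLoopA, pvCuts]
    rw [if_neg (by simp [List.drop_eq_nil_iff]; omega)]
    by_cases hfit : (cs.length : Int) - (k : Int) ≤ ms
    · rw [if_pos (by rw [List.length_drop]; omega), if_pos hfit]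
      have hslice : PySem.List.slice cs (some (k : Int)) (some (cs.length : Int)) = cs.drop k := by
        simp only [PySem.List.slice_natCast]
        rw [List.take_of_length_le (by simp)]
      simp [pvRender, PySem.Chars.slice_eq_listSlice, hslice]
    · rw [if_neg (by rw [List.length_drop]; omega), if_neg hfit]
      have hwin : PySem.Chars.slice cs (some (k : Int)) (some ((k : Int) + ms))
          = (cs.drop k).take ms.toNat := by
        have hcast : (k : Int) + ms = ((k + ms.toNat : Nat) : Int) := by push_cast; omega
        rw [hcast]
        simp only [PySem.Chars.slice_eq_listSlice, PySem.List.slice_natCast]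
        congr 1
        omega
      have hlt' : ms < ((cs.drop k).length : Int) := by rw [List.length_drop]; omega
      have hpick : pvPickB pvSepsB (pvLastMap (PySem.Chars.slice cs (some (k:Int)) (some ((k:Int) + ms)))) ms
          = pvPickA pvSeps (cs.drop k) ms := by
        rw [show pvSepsB = pvSeps by decide, hwin, ← pvPick_eq pvSeps (cs.drop k) ms hms hlt']
      simp only [hpick]
      set sa := pvPickA pvSeps (cs.drop k) ms with hsa
      have hb := pvPickA_bounds pvSeps (cs.drop k) ms hms hlt'
      have hcast : (k : Int) + sa = ((k + sa.toNat : Nat) : Int) := by push_cast; omega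
      have hchunk : PySem.Chars.slice (cs.drop k) none (some sa)
          = PySem.Chars.slice cs (some (k : Int)) (some ((k : Int) + sa)) := by
        rw [hcast]
        simp only [PySem.Chars.slice_eq_listSlice, PySem.List.slice_natCast]
        rw [PySem.List.slice_to _ (show (0:Int) ≤ sa by omega)]
        congr 1; omega
      have hrem : PySem.Chars.slice (cs.drop k) (some sa) none = cs.drop (k + sa.toNat) := by
        simp only [PySem.Chars.slice_eq_listSlice]
        rw [PySem.List.slice_from _ (show (0:Int) ≤ sa by omega), List.drop_drop]
      rw [hchunk, hrem, pvCuts_acc]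
      have hknext : k + sa.toNat < cs.length := by omega
      rw [hcast, ih (k + sa.toNat)
            (chunks ++ [PySem.Chars.slice cs (some (k : Int)) (some ((k + sa.toNat : Nat) : Int))])
            hknext (by omega)]
      simp only [List.nil_append, List.cons_append, List.append_assoc]
      rw [pvRender_cons]

-- ===== VERDICT (by name: the statement is the Claim_ definition above) =====
theorem split_content_chunks_spec : Claim_equal_split_content_chunks := by
  intro content ms _ hpre
  unfold Spec_split_content_chunks split_content_chunks split_content_chunks_alt
  simp only []
  by_cases hfit : (content.toList.length : Int) ≤ ms
  · rw [if_pos hfit, if_pos hfit]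
  · rw [if_neg hfit, if_neg hfit]
    have hms : 1 ≤ ms := by
      rcases hpre with h | h
      · exact h
      · exact absurd h hfit
    have h0 : 0 < content.toList.length := by omega
    have := pvLoop_render content.toList ms hms (content.toList.length + 1) 0 [] h0 (by omega)
    simp only [List.drop_zero, Nat.cast_zero, List.nil_append] at this
    rw [this]
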